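-- pv_equiv track=rewrite | github.com/vits-hugs/TrabalhoFormais | ER/Er_reader.py | get_inner_parent
-- ===== SOURCE A (Python) =====
-- def get_inner_parent(regex):
--     pilha = []
--     start = 0
--     fim = len(regex)
--     for i in range(len(regex)):
--         if regex[i]=='(':
--             start = i+1
--         if regex[i]==')':
--             fim = i
--             break
--     regex = regex[start:fim]
--     return regex,start-1,fim+1
-- ===== SOURCE B (Python) =====
-- def get_inner_parent(regex):
--     # Builds the innermost content directly: accumulate characters, reset on '(',
--     # stop at the first ')'. No index bookkeeping or slicing.
--     acc = []
--     consumed = 0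
--     for ch in regex:
--         if ch == ')':
--             return ''.join(acc), consumed - len(acc) - 1, consumed + 1
--         consumed += 1
--         if ch == '(':
--             acc = []
--         else:
--             acc.append(ch)
--     return ''.join(acc), consumed - len(acc) - 1, len(regex) + 1
-- ===== Notes on version B (the rewrite author's own statement) =====
-- stated objective: alternative
-- what changed: Instead of tracking start/fim indices and slicing the string at the end, B builds the inner content directly in an accumulator list that is reset whenever '(' is seen and returned at the first ')', deriving the bounds from the consumed count and the accumulator length.
import Mathlib
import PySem

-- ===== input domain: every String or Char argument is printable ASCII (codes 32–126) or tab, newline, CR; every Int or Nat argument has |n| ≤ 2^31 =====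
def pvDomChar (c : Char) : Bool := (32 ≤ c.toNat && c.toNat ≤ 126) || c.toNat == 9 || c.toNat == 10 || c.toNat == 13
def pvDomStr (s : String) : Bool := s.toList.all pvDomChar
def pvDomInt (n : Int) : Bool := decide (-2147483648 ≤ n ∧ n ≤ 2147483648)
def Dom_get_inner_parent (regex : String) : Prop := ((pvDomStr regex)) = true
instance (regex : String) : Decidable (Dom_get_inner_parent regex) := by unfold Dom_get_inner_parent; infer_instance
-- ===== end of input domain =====

-- B drops A's index bookkeeping + final slice and instead BUILDS the inner content in an
-- accumulator reset at every '(' (alternative decomposition; same O(n) cost).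

-- ===== PORT A =====
-- A's for-loop over range(len(regex)) with break at the first ')': structural
-- recursion over the characters carrying the index i and the accumulators start, fim.
def loopA_getip : List Char → Int → Int → Int → Int × Int
  | [], _, start, fim => (start, fim)
  | c :: rest, i, start, fim =>
    let start' := if c = '(' then i + 1 else start
    if c = ')' then (start', i) else loopA_getip rest (i + 1) start' fim

def get_inner_parent (regex : String) : String × Int × Int :=
  let p := loopA_getip regex.toList 0 0 (PySem.Str.len regex)
  (PySem.Str.slice regex (some p.1) (some p.2), p.1 - 1, p.2 + 1)

-- ===== PORT B =====
-- Source B's loop: accumulate characters into acc, reset acc on '(', return at the first ')';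
-- consumed counts the characters already passed.
def loopB_getip : List Char → List Char → Int → Int → String × Int × Int
  | [], acc, consumed, total =>
      (String.ofList acc, consumed - acc.length - 1, total + 1)
  | c :: rest, acc, consumed, total =>
      if c = ')' then (String.ofList acc, consumed - acc.length - 1, consumed + 1)
      else loopB_getip rest (if c = '(' then [] else acc ++ [c]) (consumed + 1) total

def get_inner_parent_alt (regex : String) : String × Int × Int :=
  loopB_getip regex.toList [] 0 (PySem.Str.len regex)

-- ===== PRECONDITION & SPEC =====
def Spec_get_inner_parent (regex : String) (out : String × Int × Int) : Prop := out = get_inner_parent_alt regex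
instance (regex : String) (out : String × Int × Int) : Decidable (Spec_get_inner_parent regex out) := by unfold Spec_get_inner_parent; infer_instance

-- ===== CLAIM (what is proved, stated in full; the proofs are below) =====
def Claim_equal_get_inner_parent : Prop := ∀ (regex : String), Dom_get_inner_parent regex → Spec_get_inner_parent regex (get_inner_parent regex)

-- ===== LEMMAS AND PROOFS =====

-- first index of c in cs, -1 if absent
def fIgp : List Char → Char → Int
  | [], _ => -1
  | x :: xs, c => if x = c then 0 else (if fIgp xs c = -1 then -1 else fIgp xs c + 1)

-- last index of c in cs, -1 if absent
def gIgp : List Char → Char → Int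
  | [], _ => -1
  | x :: xs, c => if gIgp xs c = -1 then (if x = c then 0 else -1) else gIgp xs c + 1

-- the number of characters the loops examine: first ')' index, or the whole list
def fNgp (cs : List Char) : Nat := if fIgp cs ')' = -1 then cs.length else (fIgp cs ')').toNat

-- B's final accumulator
def accF : List Char → List Char → List Char
  | [], acc => acc
  | c :: rest, acc => if c = ')' then acc else accF rest (if c = '(' then [] else acc ++ [c])

lemma fIgp_bounds (c : Char) : ∀ (cs : List Char), fIgp cs c = -1 ∨ (0 ≤ fIgp cs c ∧ fIgp cs c < cs.length)
  | [] => Or.inl rfl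
  | x :: xs => by
    rcases fIgp_bounds c xs with h | h <;> simp [fIgp, h] <;> split_ifs <;> simp_all <;> omega

lemma gIgp_bounds (c : Char) : ∀ (cs : List Char), gIgp cs c = -1 ∨ (0 ≤ gIgp cs c ∧ gIgp cs c < cs.length)
  | [] => Or.inl rfl
  | x :: xs => by
    rcases gIgp_bounds c xs with h | h <;> simp [gIgp, h] <;> split_ifs <;> simp_all <;> omega

lemma loopA_eq : ∀ (cs : List Char) (i st fim : Int),
    loopA_getip cs i st fim =
      ( if gIgp (cs.take (fNgp cs)) '(' = -1 then st else i + gIgp (cs.take (fNgp cs)) '(' + 1,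
        if fIgp cs ')' = -1 then fim else i + fIgp cs ')' )
  | [], i, st, fim => by simp [loopA_getip, fNgp, fIgp, gIgp]
  | c :: cs, i, st, fim => by
    by_cases hc : c = ')'
    · subst hc
      have hfI : fIgp (')' :: cs) ')' = 0 := by simp [fIgp]
      have hN : fNgp (')' :: cs) = 0 := by simp [fNgp, hfI]
      rw [hN, hfI]
      simp [loopA_getip, gIgp]
    · have ih := loopA_eq cs (i + 1) (if c = '(' then i + 1 else st) fim
      have hf : fIgp (c :: cs) ')' = if fIgp cs ')' = -1 then -1 else fIgp cs ')' + 1 := by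
        simp [fIgp, hc]
      have hN : fNgp (c :: cs) = fNgp cs + 1 := by
        rcases fIgp_bounds ')' cs with h | h
        · simp [fNgp, hf, h]
        · have hne : fIgp cs ')' ≠ -1 := by omega
          unfold fNgp
          rw [hf, if_neg hne, if_neg (by omega : ¬ (fIgp cs ')' + 1 = -1)), if_neg hne]
          omega
      have htake : (c :: cs).take (fNgp (c :: cs)) = c :: cs.take (fNgp cs) := by
        rw [hN]; rfl
      have hgI : gIgp (c :: cs.take (fNgp cs)) '(' =
          if gIgp (cs.take (fNgp cs)) '(' = -1 then (if c = '(' then 0 else -1)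
          else gIgp (cs.take (fNgp cs)) '(' + 1 := rfl
      have hge := gIgp_bounds '(' (cs.take (fNgp cs))
      simp only [loopA_getip, if_neg hc, ih, htake, hgI, hf]
      rcases fIgp_bounds ')' cs with h | h <;>
        by_cases hp : c = '(' <;>
        split_ifs at * <;> simp_all <;> omega

lemma loopB_eq : ∀ (cs acc : List Char) (i total : Int),
    loopB_getip cs acc i total =
      ( String.ofList (accF cs acc),
        i + (if fIgp cs ')' = -1 then (cs.length : Int) else fIgp cs ')')
          - ((accF cs acc).length : Int) - 1,
        if fIgp cs ')' = -1 then total + 1 else i + fIgp cs ')' + 1 )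
  | [], acc, i, total => by simp [loopB_getip, accF, fIgp]
  | c :: rest, acc, i, total => by
    by_cases hc : c = ')'
    · subst hc
      have hfI : fIgp (')' :: rest) ')' = 0 := by simp [fIgp]
      simp [loopB_getip, accF, hfI]
    · have ih := loopB_eq rest (if c = '(' then [] else acc ++ [c]) (i + 1) total
      have hf : fIgp (c :: rest) ')' = if fIgp rest ')' = -1 then -1 else fIgp rest ')' + 1 := by
        simp [fIgp, hc]
      have hacc : accF (c :: rest) acc = accF rest (if c = '(' then [] else acc ++ [c]) := by
        simp [accF, hc]
      simp only [loopB_getip, if_neg hc, ih, hacc, hf]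
      rcases fIgp_bounds ')' rest with h | h
      · simp [h]; omega
      · have hne : fIgp rest ')' ≠ -1 := by omega
        simp [hne]; omega

lemma accF_eq : ∀ (cs acc : List Char),
    accF cs acc =
      (if gIgp (cs.take (fNgp cs)) '(' = -1 then acc else [])
        ++ (cs.take (fNgp cs)).drop ((gIgp (cs.take (fNgp cs)) '(' + 1).toNat)
  | [], acc => by simp [accF, fNgp, fIgp, gIgp]
  | c :: rest, acc => by
    by_cases hc : c = ')'
    · subst hc
      have hfI : fIgp (')' :: rest) ')' = 0 := by simp [fIgp]
      have hN : fNgp (')' :: rest) = 0 := by simp [fNgp, hfI]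
      simp [accF, hN, gIgp]
    · have hf : fIgp (c :: rest) ')' = if fIgp rest ')' = -1 then -1 else fIgp rest ')' + 1 := by
        simp [fIgp, hc]
      have hN : fNgp (c :: rest) = fNgp rest + 1 := by
        rcases fIgp_bounds ')' rest with h | h
        · simp [fNgp, hf, h]
        · have hne : fIgp rest ')' ≠ -1 := by omega
          unfold fNgp
          rw [hf, if_neg hne, if_neg (by omega : ¬ (fIgp rest ')' + 1 = -1)), if_neg hne]
          omega
      have htake : (c :: rest).take (fNgp (c :: rest)) = c :: rest.take (fNgp rest) := by
        rw [hN]; rfl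
      set t := rest.take (fNgp rest) with ht
      have hgI : gIgp (c :: t) '(' =
          if gIgp t '(' = -1 then (if c = '(' then 0 else -1) else gIgp t '(' + 1 := rfl
      have hge := gIgp_bounds '(' t
      rw [htake]
      by_cases hp : c = '('
      · have ih := accF_eq rest ([] : List Char)
        rw [← ht] at ih
        have hstep : accF (c :: rest) acc = accF rest [] := by simp [accF, hp]
        rw [hstep, ih, hgI]
        rcases hge with h | h
        · have h0 : (gIgp t '(' + 1).toNat = 0 := by omega
          simp [h, hp]
        · have h1 : ¬ gIgp t '(' = -1 := by omega
          have h2 : ¬ gIgp t '(' + 1 = -1 := by omega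
          have h3 : (gIgp t '(' + 1 + 1).toNat = (gIgp t '(' + 1).toNat + 1 := by omega
          simp [h1, h2, h3]
      · have ih := accF_eq rest (acc ++ [c])
        rw [← ht] at ih
        have hstep : accF (c :: rest) acc = accF rest (acc ++ [c]) := by simp [accF, hc, hp]
        rw [hstep, ih, hgI]
        rcases hge with h | h
        · have h0 : (gIgp t '(' + 1).toNat = 0 := by omega
          simp [h, hp]
        · have h1 : ¬ gIgp t '(' = -1 := by omega
          have h2 : ¬ gIgp t '(' + 1 = -1 := by omega
          have h3 : (gIgp t '(' + 1 + 1).toNat = (gIgp t '(' + 1).toNat + 1 := by omega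
          simp [h1, h2, h3]

-- ===== VERDICT (by name: the statement is the Claim_ definition above) =====
theorem get_inner_parent_spec : Claim_equal_get_inner_parent := by
  intro regex _
  unfold Spec_get_inner_parent get_inner_parent get_inner_parent_alt
  simp only [PySem.Str.len]
  set cs := regex.toList with hcs
  rw [loopA_eq, loopB_eq, accF_eq]
  have hbF := fIgp_bounds ')' cs
  have hbG := gIgp_bounds '(' (cs.take (fNgp cs))
  set fI := fIgp cs ')' with hfI
  set g := gIgp (cs.take (fNgp cs)) '(' with hg
  have hfN : (fNgp cs : Int) = if fI = -1 then (cs.length : Int) else fI := by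
    unfold fNgp; rw [← hfI]
    rcases hbF with h | h
    · simp [h]
    · rw [if_neg (by omega), if_neg (by omega)]; omega
  have hfNle : fNgp cs ≤ cs.length := by
    unfold fNgp; rw [← hfI]
    rcases hbF with h | h
    · simp [h]
    · rw [if_neg (by omega)]; omega
  have htlen : (cs.take (fNgp cs)).length = fNgp cs := by simp; omega
  have hgN : g < (fNgp cs : Int) := by
    rcases hbG with h | h
    · have h2 : (0:Int) ≤ (fNgp cs : Int) := by positivity
      omega
    · rw [htlen] at h; omega
  have hdlen : ((cs.take (fNgp cs)).drop ((g + 1).toNat)).length = fNgp cs - (g + 1).toNat := by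
    simp [htlen]
  -- the three components
  have hS : (if g = -1 then (0:Int) else 0 + g + 1) = ((g + 1).toNat : Int) := by
    split_ifs with h <;> omega
  have hstr : PySem.Str.slice regex (some (if g = -1 then (0:Int) else 0 + g + 1))
        (some (if fI = -1 then (regex.toList.length : Int) else 0 + fI)) =
      String.ofList ((if g = -1 then ([] : List Char) else []) ++ (cs.take (fNgp cs)).drop ((g + 1).toNat)) := by
    have hF : (if fI = -1 then (regex.toList.length : Int) else 0 + fI) = ((fNgp cs : Nat) : Int) := by
      rw [hfN, ← hcs]; split_ifs <;> omega
    rw [hS, hF]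
    have := PySem.Str.toList_slice regex (some ((g + 1).toNat : Int)) (some ((fNgp cs : Nat) : Int))
    apply String.toList_injective
    rw [this, ← hcs]
    refine (PySem.List.slice_natCast cs ((g + 1).toNat) (fNgp cs)).trans ?_
    have : (cs.drop ((g + 1).toNat)).take (fNgp cs - (g + 1).toNat) = (cs.take (fNgp cs)).drop ((g + 1).toNat) := by
      rw [List.drop_take]
    simp [this]
  refine Prod.ext ?_ (Prod.ext ?_ ?_)
  · exact hstr
  · show (if g = -1 then (0:Int) else 0 + g + 1) - 1 = _
    show _ = 0 + (if fI = -1 then (cs.length : Int) else fI)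
      - ((((if g = -1 then ([] : List Char) else []) ++ (cs.take (fNgp cs)).drop ((g + 1).toNat)).length : Nat) : Int) - 1
    have hlen2 : (((if g = -1 then ([] : List Char) else []) ++ (cs.take (fNgp cs)).drop ((g + 1).toNat)).length)
        = fNgp cs - (g + 1).toNat := by
      split_ifs <;> simp [hdlen]
    rw [hlen2, ← hfN]
    have hle : (g + 1).toNat ≤ fNgp cs := by omega
    rcases hbG with h | h
    · rw [if_pos h]; push_cast [Nat.cast_sub hle]; omega
    · rw [if_neg (by omega)]; push_cast [Nat.cast_sub hle]; omega
  · show (if fI = -1 then (regex.toList.length : Int) else 0 + fI) + 1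
        = (if fI = -1 then (cs.length : Int) + 1 else 0 + fI + 1)
    rw [← hcs]; split_ifs <;> omega
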